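-- pv_equiv track=rewrite | github.com/OZestina/TheGreatestGrace | codingTest/programmers/py/*220107_보석쇼핑.py | solution
-- ===== SOURCE A (Python) =====
-- from collections import defaultdict
--
-- def solution(gems):
--     answer = []
--
--     jewel = defaultdict(list)
--     for i in range(len(gems)):
--         jewel[gems[i]] += [i]
--
--     for i in range(len(gems)):
--         end = i
--         for j, value in jewel.items():
--             if value[-1] < i:
--                 end = -1
--                 break
--             for v in value:
--                 if i <= v:
--                     if end < v:
--                         end = v
--                     break
--         if i <= end:
--             answer.append([i, end])
--
--     temp = min(answer, key=lambda x: x[1] - x[0])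
--     return [temp[0] + 1, temp[1] + 1]
-- ===== SOURCE B (Python) =====
-- def solution(gems):
--     # One backward pass: nxt[g] = first occurrence of g at index >= i; when nxt
--     # covers every kind, [i, max(nxt.values())] is the shortest window starting
--     # at i.  '<=' keeps the smallest start among windows of minimal length.
--     kinds = len(set(gems))
--     nxt = {}
--     best = None
--     for i in range(len(gems) - 1, -1, -1):
--         nxt[gems[i]] = i
--         if len(nxt) == kinds:
--             end = max(nxt.values())
--             if best is None or end - i <= best[1] - best[0]:
--                 best = (i, end)
--     return [best[0] + 1, best[1] + 1]
-- ===== Notes on version B (the rewrite author's own statement) =====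
-- stated objective: faster
-- what changed: Replaces A's per-start rescans of every type's full occurrence list (plus a precomputed index dict and a final min pass) by a single backward sweep that maintains a next-occurrence-per-type dict and the running best window online.
import Mathlib
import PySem

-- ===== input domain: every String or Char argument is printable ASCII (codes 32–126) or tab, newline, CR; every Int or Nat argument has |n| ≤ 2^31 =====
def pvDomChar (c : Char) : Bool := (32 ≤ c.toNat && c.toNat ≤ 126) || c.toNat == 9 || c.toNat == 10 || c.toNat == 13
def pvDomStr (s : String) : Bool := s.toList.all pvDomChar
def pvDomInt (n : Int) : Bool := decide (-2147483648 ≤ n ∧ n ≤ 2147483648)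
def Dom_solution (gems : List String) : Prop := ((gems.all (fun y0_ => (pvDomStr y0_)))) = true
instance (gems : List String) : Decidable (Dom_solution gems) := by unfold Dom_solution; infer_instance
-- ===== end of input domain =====

-- B replaces A's per-start rescans of every occurrence list by one backward sweep with a
-- next-occurrence dict and an online running best (objective: faster).

-- ===== PORT A =====
-- inner 'for v in value: if i <= v: (if end < v: end = v); break'
def solAInner (i e : Int) : List Int → Int
  | [] => e
  | v :: rest => if i ≤ v then (if e < v then v else e) else solAInner i e rest

-- 'for j, value in jewel.items(): if value[-1] < i: end = -1; break; <inner>'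
def solAItems (i : Int) : List (String × List Int) → Int → Int
  | [], e => e
  | (_, value) :: rest, e =>
      if PySem.List.pyGetD value (-1) 0 < i then -1
      else solAItems i rest (solAInner i e value)

def solution (gems : List String) : List Int :=
  let jewel : PySem.Dict String (List Int) :=
    (PySem.List.pyRange 0 (gems.length : Int) 1).foldl
      (fun d i => d.modify (PySem.List.pyGetD gems i "") [] (fun l => l ++ [i]))
      PySem.Dict.empty
  let answer : List (List Int) :=
    (PySem.List.pyRange 0 (gems.length : Int) 1).foldl
      (fun acc i =>
        let e := solAItems i jewel.items i
        if i ≤ e then acc ++ [[i, e]] else acc) []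
  match PySem.List.min? answer (fun x => PySem.List.pyGetD x 1 0 - PySem.List.pyGetD x 0 0) with
  | some temp => [PySem.List.pyGetD temp 0 0 + 1, PySem.List.pyGetD temp 1 0 + 1]
  | none => []  -- unreachable under Pre_: Python's min raises ValueError on an empty list

-- ===== PORT B =====
-- one step of the backward sweep: record gems[i] as next occurrence, update running best
def solBStep (gems : List String) (kinds : Nat)
    (p : PySem.Dict String Int × Option (Int × Int)) (i : Int) :
    PySem.Dict String Int × Option (Int × Int) :=
  let nxt := p.1.insert (PySem.List.pyGetD gems i "") i
  if nxt.size = kinds then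
    -- max(nxt.values()): the dict is nonempty here, so Python's max returns a value
    let e := (PySem.List.max? nxt.values (fun v => v)).getD 0
    match p.2 with
    | none => (nxt, some (i, e))
    | some b => if e - i ≤ b.2 - b.1 then (nxt, some (i, e)) else (nxt, b)
  else (nxt, p.2)

def solution_alt (gems : List String) : List Int :=
  let kinds := (PySem.Set.ofList gems).length
  let st := (PySem.List.pyRange ((gems.length : Int) - 1) (-1) (-1)).foldl
      (solBStep gems kinds) (PySem.Dict.empty, none)
  match st.2 with
  | some b => [b.1 + 1, b.2 + 1]
  | none => []  -- unreachable under Pre_: Python raises TypeError ('best' stays None)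

-- ===== PRECONDITION & SPEC =====
-- Pre_ excludes only the empty list, on which A raises ValueError (min of an empty sequence).
def Pre_solution (gems : List String) : Prop := gems ≠ []
instance (gems : List String) : Decidable (Pre_solution gems) := by unfold Pre_solution; infer_instance
def pvWitness_solution : List String := ["a", "b", "a"]

def Spec_solution (gems : List String) (out : List Int) : Prop := out = solution_alt gems
instance (gems : List String) (out : List Int) : Decidable (Spec_solution gems out) := by unfold Spec_solution; infer_instance

-- ===== CLAIM (what is proved, stated in full; the proofs are below) =====
def Claim_equal_solution : Prop := ∀ (gems : List String), Dom_solution gems → Pre_solution gems → Spec_solution gems (solution gems)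

-- ===== LEMMAS AND PROOFS =====

-- first occurrence of g at an index ≥ i
def pvFge (gems : List String) (i : Int) (g : String) : Option Int :=
  (PySem.List.pyRange i (gems.length : Int) 1).find? (fun j => PySem.List.pyGetD gems j "" == g)

def pvFgeD (gems : List String) (i : Int) (g : String) : Int := (pvFge gems i g).getD i

-- all occurrences of g (A's jewel entry)
def pvOcc (gems : List String) (g : String) : List Int :=
  (PySem.List.pyRange 0 (gems.length : Int) 1).filter (fun j => PySem.List.pyGetD gems j "" == g)

-- every kind still occurs at an index ≥ i
def pvFull (gems : List String) (i : Int) : Bool :=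
  (PySem.Set.ofList gems).all (fun g => (pvFge gems i g).isSome)

-- the end of the minimal full window starting at i
def pvE (gems : List String) (i : Int) : Int :=
  (PySem.Set.ofList gems).foldl (fun e g => max e (pvFgeD gems i g)) i

-- first minimum, as a foldr (both programs' selection reduces to this)
def pvSel {alpha : Type} (key : alpha → Int) (l : List alpha) : Option alpha :=
  l.foldr (fun x b => match b with
    | none => some x
    | some y => if key x ≤ key y then some x else some y) none

-- B's backward sweep, re-indexed: state after having processed indices n-1, …, i
def pvTB (gems : List String) (i : Int) : PySem.Dict String Int × Option (Int × Int) :=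
  (PySem.List.pyRange i (gems.length : Int) 1).foldr
    (fun j s => solBStep gems (PySem.Set.ofList gems).length s j) (PySem.Dict.empty, none)

-- ---- selection lemmas ----

theorem pvSel_step {alpha : Type} (key : alpha → Int) (x : alpha) (t : List alpha) :
    pvSel key (x :: t) = match pvSel key t with
      | none => some x
      | some y => if key x ≤ key y then some x else some y := by
  simp [pvSel]

theorem min?_foldl_aux {alpha : Type} (key : alpha → Int) (t : List alpha) : ∀ x : alpha,
    (t.foldl (fun acc y => match acc with
        | none => some y
        | some m => if key y < key m then some y else some m) (some x))
    = match pvSel key t with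
      | none => some x
      | some y => if key x ≤ key y then some x else some y := by
  induction t with
  | nil => intro x; simp [pvSel]
  | cons v t ih =>
    intro x
    rw [List.foldl_cons]
    show (t.foldl _ (if key v < key x then some v else some x)) = _
    rw [pvSel_step]
    by_cases hvx : key v < key x
    · rw [if_pos hvx, ih v]
      rcases h : pvSel key t with _ | y <;> simp only []
      · first | rfl | (split_ifs <;> first | rfl | (exfalso; omega))
      · by_cases hvy : key v ≤ key y
        · rw [if_pos hvy] <;> simp only [] <;>
          first | rfl | (split_ifs <;> first | rfl | (exfalso; omega))
        · rw [if_neg hvy] <;> simp only [] <;>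
          first | rfl | (split_ifs <;> first | rfl | (exfalso; omega))
    · rw [if_neg hvx, ih x]
      rcases h : pvSel key t with _ | y <;> simp only []
      · first | rfl | (split_ifs <;> first | rfl | (exfalso; omega))
      · by_cases hvy : key v ≤ key y
        · rw [if_pos hvy] <;> simp only [] <;>
          first | rfl | (split_ifs <;> first | rfl | (exfalso; omega))
        · rw [if_neg hvy] <;> simp only [] <;>
          first | rfl | (split_ifs <;> first | rfl | (exfalso; omega))

theorem min?_eq_pvSel {alpha : Type} (key : alpha → Int) (l : List alpha) :
    PySem.List.min? l key = pvSel key l := by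
  cases l with
  | nil => rfl
  | cons x t =>
    exact (min?_foldl_aux key t x).trans (pvSel_step key x t).symm

theorem pvSel_map {alpha beta : Type} (key : beta → Int) (f : alpha → beta) (l : List alpha) :
    pvSel key (l.map f) = (pvSel (fun a => key (f a)) l).map f := by
  induction l with
  | nil => rfl
  | cons x t ih =>
    rw [List.map_cons, pvSel_step, pvSel_step, ih]
    rcases h : pvSel (fun a => key (f a)) t with _ | y
    · rfl
    · simp only [Option.map_some]
      split_ifs <;> rfl

theorem pvSel_isSome {alpha : Type} (key : alpha → Int) (l : List alpha) (h : l ≠ []) :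
    (pvSel key l).isSome := by
  cases l with
  | nil => exact absurd rfl h
  | cons x t =>
    rw [pvSel_step]
    rcases pvSel key t with _ | y
    · rfl
    · simp only []
      split_ifs <;> rfl

-- ---- A-side characterisation ----

theorem solAInner_eq (i e : Int) (value : List Int) :
    solAInner i e value = match value.find? (fun v => decide (i ≤ v)) with
      | some v => max e v
      | none => e := by
  induction value with
  | nil => rfl
  | cons v rest ih =>
    by_cases h : i ≤ v
    · rw [solAInner, if_pos h, List.find?_cons_of_pos (by simpa using h)]
      simp only []
      rw [Int.max_def]
      split_ifs <;> omega
    · rw [solAInner, if_neg h, List.find?_cons_of_neg (by simpa using h), ih]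

theorem solAItems_bad (i e : Int) (items : List (String × List Int))
    (h : ∃ p ∈ items, PySem.List.pyGetD p.2 (-1) 0 < i) :
    solAItems i items e = -1 := by
  induction items generalizing e with
  | nil => simp at h
  | cons p rest ih =>
    obtain ⟨g, value⟩ := p
    by_cases hb : PySem.List.pyGetD value (-1) 0 < i
    · rw [solAItems, if_pos hb]
    · rw [solAItems, if_neg hb]
      apply ih
      rcases h with ⟨q, hq, hqlt⟩
      rcases List.mem_cons.mp hq with rfl | hq'
      · exact absurd hqlt hb
      · exact ⟨q, hq', hqlt⟩

theorem solAItems_good (i e : Int) (items : List (String × List Int))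
    (h : ∀ p ∈ items, ¬ PySem.List.pyGetD p.2 (-1) 0 < i) :
    solAItems i items e = items.foldl (fun e p => solAInner i e p.2) e := by
  induction items generalizing e with
  | nil => rfl
  | cons p rest ih =>
    obtain ⟨g, value⟩ := p
    rw [solAItems, if_neg (h _ (List.mem_cons_self)), List.foldl_cons]
    exact ih _ (fun q hq => h q (List.mem_cons_of_mem _ hq))

-- occurrence-list facts
theorem mem_pvOcc (gems : List String) (g : String) (v : Int) :
    v ∈ pvOcc gems g ↔ 0 ≤ v ∧ v < (gems.length : Int) ∧ PySem.List.pyGetD gems v "" = g := by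
  simp [pvOcc, List.mem_filter, PySem.List.mem_pyRange_one, and_assoc]

theorem pvOcc_pairwise (gems : List String) (g : String) : (pvOcc gems g).Pairwise (· < ·) := by
  exact (PySem.List.pairwise_lt_pyRange_one _ _).filter _

theorem pvOcc_ne_nil (gems : List String) (g : String) (hg : g ∈ PySem.Set.ofList gems) :
    pvOcc gems g ≠ [] := by
  rw [PySem.Set.mem_ofList] at hg
  obtain ⟨k, hk, hkg⟩ := List.mem_iff_getElem.mp hg
  have : (k : Int) ∈ pvOcc gems g := by
    rw [mem_pvOcc]
    refine ⟨by positivity, by exact_mod_cast hk, ?_⟩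
    rw [PySem.List.pyGetD_natCast, List.getD_eq_getElem?_getD, List.getElem?_eq_getElem hk, hkg]
    rfl
  exact List.ne_nil_of_mem this

theorem sorted_le_getLast (l : List Int) (h : l.Pairwise (· < ·)) (x : Int) (hx : x ∈ l)
    (hne : l ≠ []) : x ≤ l.getLast hne := by
  induction l with
  | nil => exact absurd rfl hne
  | cons a t ih =>
    cases t with
    | nil =>
      simp only [List.mem_singleton] at hx
      simp [hx, List.getLast]
    | cons b t2 =>
      rw [List.getLast_cons (by simp)]
      rcases List.mem_cons.mp hx with rfl | hx'
      · have : ∀ y ∈ b :: t2, x < y := (List.pairwise_cons.mp h).1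
        exact le_of_lt (this _ (List.getLast_mem _))
      · exact ih (List.pairwise_cons.mp h).2 hx' (by simp)

theorem pvFge_eq_some (gems : List String) (i : Int) (g : String) (v : Int)
    (h : pvFge gems i g = some v) :
    i ≤ v ∧ v < (gems.length : Int) ∧ PySem.List.pyGetD gems v "" = g := by
  have hmem := List.mem_of_find?_eq_some h
  have hp := List.find?_some h
  rw [PySem.List.mem_pyRange_one] at hmem
  exact ⟨hmem.1, hmem.2, by simpa using hp⟩

theorem pvFge_isSome_iff (gems : List String) (i : Int) (g : String) (h0 : 0 ≤ i) :
    (pvFge gems i g).isSome ↔ ∃ v ∈ pvOcc gems g, i ≤ v := by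
  constructor
  · intro hs
    obtain ⟨v, hv⟩ := Option.isSome_iff_exists.mp hs
    obtain ⟨h1, h2, h3⟩ := pvFge_eq_some gems i g v hv
    exact ⟨v, (mem_pvOcc gems g v).mpr ⟨le_trans h0 h1, h2, h3⟩, h1⟩
  · rintro ⟨v, hv, hiv⟩
    rw [mem_pvOcc] at hv
    rw [pvFge, List.find?_isSome]
    exact ⟨v, by rw [PySem.List.mem_pyRange_one]; exact ⟨hiv, hv.2.1⟩, by simp [hv.2.2]⟩

theorem pvFge_self (gems : List String) (i : Int) (h0 : 0 ≤ i) (hn : i < (gems.length : Int)) :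
    pvFge gems i (PySem.List.pyGetD gems i "") = some i := by
  rw [pvFge, PySem.List.pyRange_one_cons hn, List.find?_cons_of_pos (by simp)]

-- find over the filtered occurrence list = find over the suffix range
-- generic: in a list of elements all ≥ i, the first one passing P is also the first ≥ i in the filtered list
theorem find_ge_filter (i : Int) (l : List Int) (hall : ∀ v ∈ l, i ≤ v) (P : Int → Bool) :
    (l.filter P).find? (fun v => decide (i ≤ v)) = l.find? P := by
  induction l with
  | nil => rfl
  | cons v t ih =>
    have hv : i ≤ v := hall v (List.mem_cons_self)
    by_cases hP : P v
    · rw [List.filter_cons_of_pos hP, List.find?_cons_of_pos (by simpa using hv),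
        List.find?_cons_of_pos hP]
    · rw [List.filter_cons_of_neg (by simpa using hP), List.find?_cons_of_neg (by simpa using hP),
        ih (fun w hw => hall w (List.mem_cons_of_mem _ hw))]

theorem find_ge_pvOcc (gems : List String) (i : Int) (g : String) (h0 : 0 ≤ i)
    (hn : i ≤ (gems.length : Int)) :
    (pvOcc gems g).find? (fun v => decide (i ≤ v)) = pvFge gems i g := by
  rw [pvOcc, PySem.List.pyRange_one_append 0 i (gems.length : Int) h0 hn, List.filter_append,
    List.find?_append]
  have h1 : ((PySem.List.pyRange 0 i 1).filter (fun j => PySem.List.pyGetD gems j "" == g)).find?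
      (fun v => decide (i ≤ v)) = none := by
    rw [List.find?_eq_none]
    intro x hx
    have := (PySem.List.mem_pyRange_one).mp (List.mem_of_mem_filter hx)
    simpa using (by omega : ¬ i ≤ x)
  rw [h1, Option.none_or]
  exact find_ge_filter i _ (fun v hv => ((PySem.List.mem_pyRange_one).mp hv).1) _

-- value[-1] < i iff no occurrence ≥ i
theorem last_lt_iff (gems : List String) (i : Int) (g : String)
    (hg : g ∈ PySem.Set.ofList gems) (h0 : 0 ≤ i) :
    (PySem.List.pyGetD (pvOcc gems g) (-1) 0 < i) ↔ pvFge gems i g = none := by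
  have hne := pvOcc_ne_nil gems g hg
  rw [PySem.List.pyGetD_neg_one _ _ hne]
  constructor
  · intro hlt
    rcases h : pvFge gems i g with _ | v
    · rfl
    · exfalso
      have hs : (pvFge gems i g).isSome := by rw [h]; rfl
      obtain ⟨v', hv', hiv'⟩ := (pvFge_isSome_iff gems i g h0).mp hs
      have := sorted_le_getLast _ (pvOcc_pairwise gems g) v' hv' hne
      omega
  · intro hnone
    have hmem := List.getLast_mem hne
    by_contra hge
    have hs : (pvFge gems i g).isSome :=
      (pvFge_isSome_iff gems i g h0).mpr ⟨_, hmem, by omega⟩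
    rw [hnone] at hs; exact absurd hs (by simp)

-- A's jewel dict, fully characterised
theorem jewel_items (gems : List String) :
    ((PySem.List.pyRange 0 (gems.length : Int) 1).foldl
      (fun d i => d.modify (PySem.List.pyGetD gems i "") [] (fun l => l ++ [i]))
      PySem.Dict.empty).items
    = (PySem.Set.ofList gems).map (fun g => (g, pvOcc gems g)) := by
  have hfold : (PySem.List.pyRange 0 (gems.length : Int) 1).foldl
      (fun d i => d.modify (PySem.List.pyGetD gems i "") [] (fun l => l ++ [i]))
      PySem.Dict.empty
      = ((PySem.List.pyRange 0 (gems.length : Int) 1).map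
          (fun i => (PySem.List.pyGetD gems i "", i))).foldl
          (fun d p => d.modify p.1 [] (fun l => l ++ [p.2])) PySem.Dict.empty := by
    rw [List.foldl_map]
  have hkeys : ((PySem.List.pyRange 0 (gems.length : Int) 1).foldl
      (fun d i => d.modify (PySem.List.pyGetD gems i "") [] (fun l => l ++ [i]))
      PySem.Dict.empty).keys = PySem.Set.ofList gems := by
    rw [PySem.Dict.keys_foldl_modify_key]
    rw [show PySem.Dict.empty.keys = ([] : List String) from rfl]
    rw [PySem.Set.update_nil_left]
    congr 1
    exact PySem.List.map_pyGetD_pyRange_zero gems ""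
  have hnodup : ((PySem.List.pyRange 0 (gems.length : Int) 1).foldl
      (fun d i => d.modify (PySem.List.pyGetD gems i "") [] (fun l => l ++ [i]))
      PySem.Dict.empty).keys.Nodup := by
    rw [hkeys]; exact PySem.Set.nodup_ofList gems
  rw [PySem.Dict.items_eq_map_keys _ hnodup [], hkeys]
  apply List.map_congr_left
  intro g hg
  congr 1
  rw [hfold, PySem.Dict.getD_foldl_modify_append]
  rw [show (PySem.Dict.empty : PySem.Dict String (List Int)).getD g [] = [] from rfl,
    List.nil_append, List.filter_map, List.map_map, pvOcc]
  simp [Function.comp_def]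

theorem le_pvE (gems : List String) (i : Int) : i ≤ pvE gems i := by
  rw [pvE, ← List.foldl_map (f := fun g => pvFgeD gems i g) (g := fun e v => max e v)]
  exact (PySem.List.le_foldl_max _ _).1

-- A's per-start end value
theorem endA_eq (gems : List String) (i : Int) (h0 : 0 ≤ i) (hn : i < (gems.length : Int)) :
    solAItems i ((PySem.Set.ofList gems).map (fun g => (g, pvOcc gems g))) i
    = if pvFull gems i then pvE gems i else -1 := by
  by_cases hf : pvFull gems i = true
  · rw [if_pos hf]
    rw [pvFull, List.all_eq_true] at hf
    have hgood : ∀ p ∈ (PySem.Set.ofList gems).map (fun g => (g, pvOcc gems g)),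
        ¬ PySem.List.pyGetD p.2 (-1) 0 < i := by
      rintro p hp
      obtain ⟨g, hg, rfl⟩ := List.mem_map.mp hp
      simp only []
      rw [last_lt_iff gems i g hg h0]
      intro hnone
      have := hf g hg
      rw [hnone] at this; simp at this
    rw [solAItems_good _ _ _ hgood, List.foldl_map, pvE]
    apply PySem.List.foldl_congr_mem
    intro e g hg
    rw [solAInner_eq, find_ge_pvOcc gems i g h0 (le_of_lt hn)]
    have hs := hf g hg
    simp only [decide_eq_true_eq] at hs
    obtain ⟨v, hv⟩ := Option.isSome_iff_exists.mp hs
    rw [hv]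
    simp [pvFgeD, hv]
  · rw [if_neg hf]
    apply solAItems_bad
    rw [pvFull, List.all_eq_true] at hf
    push_neg at hf
    obtain ⟨g, hg, hgs⟩ := hf
    refine ⟨(g, pvOcc gems g), List.mem_map_of_mem hg, ?_⟩
    show PySem.List.pyGetD (pvOcc gems g) (-1) 0 < i
    rw [last_lt_iff gems i g hg h0]
    exact Option.not_isSome_iff_eq_none.mp (by simpa using hgs)


-- ---- B-side invariant ----

theorem foldl_max_mem (l : List Int) (a : Int) : l.foldl max a = a ∨ l.foldl max a ∈ l := by
  induction l generalizing a with
  | nil => left; rfl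
  | cons x t ih =>
    rw [List.foldl_cons]
    rcases ih (max a x) with h | h
    · rcases le_total a x with hax | hax
      · right; rw [h, max_eq_right hax]; exact List.mem_cons_self
      · left; rw [h, max_eq_left hax]
    · right; exact List.mem_cons_of_mem _ h

theorem fge_isSome_mem (gems : List String) (i : Int) (g : String) (h0 : 0 ≤ i)
    (hs : (pvFge gems i g).isSome) : g ∈ gems := by
  obtain ⟨v, hv, _⟩ := (pvFge_isSome_iff gems i g h0).mp hs
  obtain ⟨hv0, hvn, hvg⟩ := (mem_pvOcc gems g v).mp hv
  rw [PySem.List.pyGetD_eq_getElem gems "" hv0 (by exact_mod_cast hvn)] at hvg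
  exact hvg ▸ List.getElem_mem _

theorem keys_perm_of_full (gems : List String) (i : Int) (h0 : 0 ≤ i)
    (keys : List String) (hnd : keys.Nodup)
    (hmem : ∀ g, g ∈ keys ↔ (pvFge gems i g).isSome)
    (hfull : pvFull gems i = true) : keys.Perm (PySem.Set.ofList gems) := by
  rw [List.perm_ext_iff_of_nodup hnd (PySem.Set.nodup_ofList gems)]
  intro g
  rw [hmem g, PySem.Set.mem_ofList]
  constructor
  · exact fun hs => fge_isSome_mem gems i g h0 hs
  · intro hg
    have := (List.all_eq_true.mp hfull) g ((PySem.Set.mem_ofList _ _).mpr hg)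
    simpa using this

theorem size_eq_iff_full (gems : List String) (i : Int) (h0 : 0 ≤ i)
    (keys : List String) (hnd : keys.Nodup)
    (hmem : ∀ g, g ∈ keys ↔ (pvFge gems i g).isSome) :
    keys.length = (PySem.Set.ofList gems).length ↔ pvFull gems i = true := by
  constructor
  · intro hlen
    have hsub : keys ⊆ PySem.Set.ofList gems := by
      intro g hg
      exact (PySem.Set.mem_ofList _ _).mpr
        (fge_isSome_mem gems i g h0 ((hmem g).mp hg))
    have hperm := (hnd.subperm hsub).perm_of_length_le (le_of_eq hlen.symm)
    rw [pvFull, List.all_eq_true]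
    intro g hg
    simpa using (hmem g).mp (hperm.mem_iff.mpr hg)
  · intro hfull
    exact (keys_perm_of_full gems i h0 keys hnd hmem hfull).length_eq

theorem pvE_eq_max_values (gems : List String) (i : Int) (h0 : 0 ≤ i)
    (hn : i < (gems.length : Int)) (keys : List String) (hnd : keys.Nodup)
    (hmem : ∀ g, g ∈ keys ↔ (pvFge gems i g).isSome)
    (hfull : pvFull gems i = true) :
    (PySem.List.max? (keys.map (fun g => pvFgeD gems i g)) (fun v => v)).getD 0
      = pvE gems i := by
  have hself : pvFge gems i (PySem.List.pyGetD gems i "") = some i := pvFge_self gems i h0 hn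
  have hselfmem : PySem.List.pyGetD gems i "" ∈ keys :=
    (hmem _).mpr (by rw [hself]; rfl)
  have hselfD : pvFgeD gems i (PySem.List.pyGetD gems i "") = i := by
    rw [pvFgeD, hself]; rfl
  have himem : i ∈ keys.map (fun g => pvFgeD gems i g) :=
    List.mem_map.mpr ⟨_, hselfmem, hselfD⟩
  have hperm : (keys.map (fun g => pvFgeD gems i g)).Perm
      ((PySem.Set.ofList gems).map (fun g => pvFgeD gems i g)) :=
    (keys_perm_of_full gems i h0 keys hnd hmem hfull).map _
  have hE : pvE gems i
      = ((PySem.Set.ofList gems).map (fun g => pvFgeD gems i g)).foldl max i := by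
    rw [pvE, ← List.foldl_map (f := fun g => pvFgeD gems i g) (g := fun e v => max e v)]
  rcases hmap : keys.map (fun g => pvFgeD gems i g) with _ | ⟨h, t⟩
  · rw [hmap] at himem; cases himem
  · rw [PySem.List.max?_id_cons, Option.getD_some, hE]
    have hub2 := PySem.List.le_foldl_max t h
    have hub1 := PySem.List.le_foldl_max ((PySem.Set.ofList gems).map (fun g => pvFgeD gems i g)) i
    apply le_antisymm
    · -- foldl max h t is a member of h :: t, hence of the ofList side, hence ≤ M1
      rcases foldl_max_mem t h with hm | hm
      · have : h ∈ ((PySem.Set.ofList gems).map (fun g => pvFgeD gems i g)) :=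
          hperm.mem_iff.mp (hmap ▸ List.mem_cons_self)
        rw [hm]; exact hub1.2 _ this
      · have : t.foldl max h ∈ ((PySem.Set.ofList gems).map (fun g => pvFgeD gems i g)) :=
          hperm.mem_iff.mp (hmap ▸ List.mem_cons_of_mem _ hm)
        exact hub1.2 _ this
    · -- M1 is i or a member of the ofList side; both are ≤ foldl max h t
      have hall : ∀ y ∈ h :: t, y ≤ t.foldl max h := by
        intro y hy
        rcases List.mem_cons.mp hy with rfl | hy'
        · exact hub2.1
        · exact hub2.2 _ hy'
      rcases foldl_max_mem ((PySem.Set.ofList gems).map (fun g => pvFgeD gems i g)) i with hm | hm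
      · rw [hm]; exact hall _ (hmap ▸ himem)
      · exact hall _ (hmap ▸ hperm.mem_iff.mpr hm)

theorem pvFge_succ (gems : List String) (i : Int) (g : String)
    (hn : i < (gems.length : Int)) (hne : g ≠ PySem.List.pyGetD gems i "") :
    pvFge gems i g = pvFge gems (i + 1) g := by
  rw [pvFge, PySem.List.pyRange_one_cons hn, List.find?_cons_of_neg (by simp [Ne.symm hne])]
  rfl

theorem solBStep_fst (gems : List String) (K : Nat) (d : PySem.Dict String Int)
    (b : Option (Int × Int)) (i : Int) :
    (solBStep gems K (d, b) i).1 = d.insert (PySem.List.pyGetD gems i "") i := by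
  rw [solBStep]
  simp only []
  split_ifs
  · rcases b with _ | p
    · rfl
    · simp only []
      split_ifs <;> rfl
  · rfl

theorem solBStep_snd_full (gems : List String) (K : Nat) (d : PySem.Dict String Int)
    (b : Option (Int × Int)) (i : Int)
    (hc : (d.insert (PySem.List.pyGetD gems i "") i).size = K) :
    (solBStep gems K (d, b) i).2 =
      (match b with
        | none => some (i, (PySem.List.max?
            (d.insert (PySem.List.pyGetD gems i "") i).values (fun v => v)).getD 0)
        | some p => if (PySem.List.max?
            (d.insert (PySem.List.pyGetD gems i "") i).values (fun v => v)).getD 0 - i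
              ≤ p.2 - p.1
          then some (i, (PySem.List.max?
            (d.insert (PySem.List.pyGetD gems i "") i).values (fun v => v)).getD 0)
          else some p) := by
  rw [solBStep]
  simp only []
  rw [if_pos hc]
  rcases b with _ | p
  · rfl
  · simp only []
    split_ifs <;> rfl

theorem solBStep_snd_notfull (gems : List String) (K : Nat) (d : PySem.Dict String Int)
    (b : Option (Int × Int)) (i : Int)
    (hc : ¬ (d.insert (PySem.List.pyGetD gems i "") i).size = K) :
    (solBStep gems K (d, b) i).2 = b := by
  rw [solBStep]
  simp only []
  rw [if_neg hc]

theorem pvTB_step (gems : List String) (i : Int) (h0 : 0 ≤ i) (hn : i < (gems.length : Int))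
    (h1 : ∀ g, (pvTB gems (i+1)).1.get? g = pvFge gems (i+1) g)
    (h2 : (pvTB gems (i+1)).1.keys.Nodup)
    (h3 : ∀ g, g ∈ (pvTB gems (i+1)).1.keys ↔ (pvFge gems (i+1) g).isSome)
    (h4 : (pvTB gems (i+1)).2 = pvSel (fun p : Int × Int => p.2 - p.1)
        (((PySem.List.pyRange (i+1) (gems.length : Int) 1).filter (pvFull gems)).map
          (fun j => (j, pvE gems j)))) :
    (∀ g, (pvTB gems i).1.get? g = pvFge gems i g) ∧
    (pvTB gems i).1.keys.Nodup ∧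
    (∀ g, g ∈ (pvTB gems i).1.keys ↔ (pvFge gems i g).isSome) ∧
    (pvTB gems i).2 = pvSel (fun p : Int × Int => p.2 - p.1)
        (((PySem.List.pyRange i (gems.length : Int) 1).filter (pvFull gems)).map
          (fun j => (j, pvE gems j))) := by
  have hstep : pvTB gems i
      = solBStep gems (PySem.Set.ofList gems).length (pvTB gems (i+1)) i := by
    rw [pvTB, pvTB, PySem.List.pyRange_one_cons hn, List.foldr_cons]
  have hpair : pvTB gems (i+1) = ((pvTB gems (i+1)).1, (pvTB gems (i+1)).2) := rfl
  have hfst : (pvTB gems i).1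
      = (pvTB gems (i+1)).1.insert (PySem.List.pyGetD gems i "") i := by
    rw [hstep, hpair, solBStep_fst]
  have hget' : ∀ g, (pvTB gems i).1.get? g = pvFge gems i g := by
    intro g
    rw [hfst, PySem.Dict.get?_insert]
    by_cases hgeq : g = PySem.List.pyGetD gems i ""
    · rw [if_pos hgeq, hgeq, pvFge_self gems i h0 hn]
    · rw [if_neg hgeq, h1 g, pvFge_succ gems i g hn hgeq]
  have hnodup' : (pvTB gems i).1.keys.Nodup := by
    rw [hfst]; exact PySem.Dict.nodup_keys_insert _ _ _ h2
  have hmem' : ∀ g, g ∈ (pvTB gems i).1.keys ↔ (pvFge gems i g).isSome := by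
    intro g
    rw [hfst, PySem.Dict.mem_keys_insert]
    by_cases hgeq : g = PySem.List.pyGetD gems i ""
    · simp only [hgeq, true_or, true_iff]
      rw [pvFge_self gems i h0 hn]; rfl
    · rw [h3 g, pvFge_succ gems i g hn hgeq]
      simp [hgeq]
  have hsz : (pvTB gems i).1.size = (pvTB gems i).1.keys.length := by
    simp [PySem.Dict.size, PySem.Dict.keys]
  refine ⟨hget', hnodup', hmem', ?_⟩
  by_cases hful : pvFull gems i = true
  · have hcond : ((pvTB gems (i+1)).1.insert (PySem.List.pyGetD gems i "") i).size
        = (PySem.Set.ofList gems).length := by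
      rw [← hfst, hsz]
      exact (size_eq_iff_full gems i h0 _ hnodup' hmem').mpr hful
    have hvals : ((pvTB gems (i+1)).1.insert (PySem.List.pyGetD gems i "") i).values
        = (pvTB gems i).1.keys.map (fun g => pvFgeD gems i g) := by
      rw [← hfst, PySem.Dict.values_eq_map_keys _ hnodup' 0]
      apply List.map_congr_left
      intro g hg
      obtain ⟨v, hv⟩ := Option.isSome_iff_exists.mp ((hmem' g).mp hg)
      rw [PySem.Dict.getD_of_get?_eq_some _ 0 ((hget' g).trans hv), pvFgeD, hv]
      rfl
    have he : (PySem.List.max?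
        (((pvTB gems (i+1)).1.insert (PySem.List.pyGetD gems i "") i).values)
        (fun v => v)).getD 0 = pvE gems i := by
      rw [hvals]
      exact pvE_eq_max_values gems i h0 hn _ hnodup' hmem' hful
    rw [hstep, hpair, solBStep_snd_full gems _ _ _ i hcond, he,
      PySem.List.pyRange_one_cons hn, List.filter_cons_of_pos hful, List.map_cons,
      pvSel_step, ← h4]
    rcases (pvTB gems (i+1)).2 with _ | p
    · rfl
    · rfl
  · have hcond : ¬ ((pvTB gems (i+1)).1.insert (PySem.List.pyGetD gems i "") i).size
        = (PySem.Set.ofList gems).length := by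
      rw [← hfst, hsz]
      intro hlen
      exact hful ((size_eq_iff_full gems i h0 _ hnodup' hmem').mp hlen)
    rw [hstep, hpair, solBStep_snd_notfull gems _ _ _ i hcond, h4,
      PySem.List.pyRange_one_cons hn, List.filter_cons_of_neg (by simpa using hful)]

theorem pvTB_invariant (gems : List String) (k : Nat) (hk : k ≤ gems.length) :
    (∀ g, (pvTB gems ((gems.length : Int) - k)).1.get? g = pvFge gems ((gems.length : Int) - k) g) ∧
    (pvTB gems ((gems.length : Int) - k)).1.keys.Nodup ∧
    (∀ g, g ∈ (pvTB gems ((gems.length : Int) - k)).1.keys ↔ (pvFge gems ((gems.length : Int) - k) g).isSome) ∧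
    (pvTB gems ((gems.length : Int) - k)).2 =
      pvSel (fun p : Int × Int => p.2 - p.1)
        (((PySem.List.pyRange ((gems.length : Int) - k) (gems.length : Int) 1).filter
            (pvFull gems)).map (fun j => (j, pvE gems j))) := by
  induction k with
  | zero =>
    have hnil : PySem.List.pyRange ((gems.length : Int) - (0 : Nat)) (gems.length : Int) 1
        = [] := by
      rw [PySem.List.pyRange_one_eq_nil (by simp)]
    refine ⟨?_, ?_, ?_, ?_⟩
    · intro g
      rw [pvTB, hnil]
      show (PySem.Dict.empty : PySem.Dict String Int).get? g = _
      rw [PySem.Dict.get?_empty, pvFge, PySem.List.pyRange_one_eq_nil (by simp)]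
      rfl
    · rw [pvTB, hnil]; exact List.nodup_nil
    · intro g
      rw [pvTB, hnil, pvFge, PySem.List.pyRange_one_eq_nil (by simp)]
      show g ∈ (PySem.Dict.empty : PySem.Dict String Int).keys ↔ _
      rw [PySem.Dict.keys_empty]
      simp
    · rw [pvTB, hnil]
      rfl
  | succ k ih =>
    have hi1 : (gems.length : Int) - ((k : Nat) + 1 : Nat) + 1 = (gems.length : Int) - k := by
      push_cast; ring
    obtain ⟨g1, g2, g3, g4⟩ := ih (by omega)
    rw [← hi1] at g1 g2 g3 g4
    exact pvTB_step gems ((gems.length : Int) - ((k : Nat) + 1 : Nat))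
      (by push_cast; omega) (by push_cast; omega) g1 g2 g3 g4

theorem pvFull_zero (gems : List String) : pvFull gems 0 = true := by
  rw [pvFull, List.all_eq_true]
  intro g hg
  obtain ⟨v, hv⟩ := List.exists_mem_of_ne_nil _ (pvOcc_ne_nil gems g hg)
  have h0 : (0 : Int) ≤ v := ((mem_pvOcc gems g v).mp hv).1
  simpa using (pvFge_isSome_iff gems 0 g (le_refl 0)).mpr ⟨v, hv, h0⟩


-- ===== VERDICT (by name: the statement is the Claim_ definition above) =====
theorem answer_eq (gems : List String) :
    (PySem.List.pyRange 0 (gems.length : Int) 1).foldl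
      (fun acc i =>
        let e := solAItems i ((PySem.Set.ofList gems).map (fun g => (g, pvOcc gems g))) i
        if i ≤ e then acc ++ [[i, e]] else acc) []
    = ((PySem.List.pyRange 0 (gems.length : Int) 1).filter (pvFull gems)).map
        (fun i => [i, pvE gems i]) := by
  rw [PySem.List.foldl_congr_mem _ _
    (fun acc i => if pvFull gems i then acc ++ [[i, pvE gems i]] else acc) _ ?_]
  · exact (PySem.List.foldl_append_if (pvFull gems) (fun i => [i, pvE gems i]) _ []).trans
      (List.nil_append _)
  · intro acc x hx
    have hb := (PySem.List.mem_pyRange_one).mp hx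
    show (let e := solAItems x ((PySem.Set.ofList gems).map (fun g => (g, pvOcc gems g))) x
      if x ≤ e then acc ++ [[x, e]] else acc) = _
    rw [endA_eq gems x hb.1 hb.2]
    by_cases hful : pvFull gems x = true
    · rw [if_pos hful]
      show (if x ≤ pvE gems x then acc ++ [[x, pvE gems x]] else acc) = _
      rw [if_pos (le_pvE gems x)]
      simp [hful]
    · rw [if_neg hful]
      show (if x ≤ (-1 : Int) then acc ++ [[x, -1]] else acc) = _
      rw [if_neg (by omega)]
      simp [hful]

theorem solution_spec : Claim_equal_solution := by
  unfold Claim_equal_solution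
  intro gems _ hpre
  unfold Spec_solution
  have hne : gems ≠ [] := hpre
  have hn0 : 0 < gems.length := List.length_pos_of_ne_nil hne
  -- the common selection
  have hcne : (PySem.List.pyRange 0 (gems.length : Int) 1).filter (pvFull gems) ≠ [] := by
    apply List.ne_nil_of_mem (a := (0 : Int))
    rw [List.mem_filter]
    exact ⟨(PySem.List.mem_pyRange_one).mpr ⟨le_refl _, by exact_mod_cast hn0⟩,
      pvFull_zero gems⟩
  obtain ⟨istar, hsel⟩ := Option.isSome_iff_exists.mp
    (pvSel_isSome (fun j => pvE gems j - j) _ hcne)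
  -- A side
  have hA : solution gems = [istar + 1, pvE gems istar + 1] := by
    have h0 : solution gems = (match PySem.List.min?
        ((PySem.List.pyRange 0 (gems.length : Int) 1).foldl
          (fun acc i =>
            let e := solAItems i ((PySem.List.pyRange 0 (gems.length : Int) 1).foldl
              (fun d i => d.modify (PySem.List.pyGetD gems i "") [] (fun l => l ++ [i]))
              PySem.Dict.empty).items i
            if i ≤ e then acc ++ [[i, e]] else acc) [])
        (fun x => PySem.List.pyGetD x 1 0 - PySem.List.pyGetD x 0 0) with
      | some temp => [PySem.List.pyGetD temp 0 0 + 1, PySem.List.pyGetD temp 1 0 + 1]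
      | none => []) := rfl
    rw [h0, jewel_items, answer_eq gems, min?_eq_pvSel, pvSel_map]
    have hkey : (fun a => PySem.List.pyGetD ((fun i => ([i, pvE gems i] : List Int)) a) 1 0
        - PySem.List.pyGetD ((fun i => ([i, pvE gems i] : List Int)) a) 0 0)
        = (fun j => pvE gems j - j) := by
      funext a
      rfl
    rw [hkey, hsel]
    rfl
  -- B side
  have hB : solution_alt gems = [istar + 1, pvE gems istar + 1] := by
    have h0 : solution_alt gems = (match ((PySem.List.pyRange ((gems.length : Int) - 1) (-1)
        (-1)).foldl (solBStep gems (PySem.Set.ofList gems).length)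
        (PySem.Dict.empty, none)).2 with
      | some b => [b.1 + 1, b.2 + 1]
      | none => []) := rfl
    have hrev : PySem.List.pyRange ((gems.length : Int) - 1) (-1) (-1)
        = (PySem.List.pyRange 0 (gems.length : Int) 1).reverse := by
      rw [PySem.List.pyRange_neg_one_eq_reverse]
      norm_num
    rw [h0, hrev, List.foldl_reverse]
    have hTB : (PySem.List.pyRange 0 (gems.length : Int) 1).foldr
        (fun x s => solBStep gems (PySem.Set.ofList gems).length s x)
        (PySem.Dict.empty, none) = pvTB gems 0 := rfl
    rw [hTB]
    have hzero : (gems.length : Int) - (gems.length : Nat) = 0 := by push_cast; ring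
    have hinv := (pvTB_invariant gems gems.length (le_refl _)).2.2.2
    rw [hzero] at hinv
    rw [hinv, pvSel_map]
    have hkey : (fun a => ((fun j => ((j, pvE gems j) : Int × Int)) a).2
        - ((fun j => ((j, pvE gems j) : Int × Int)) a).1) = (fun j => pvE gems j - j) := by
      funext a
      rfl
    rw [hkey, hsel]
    rfl
  rw [hA, hB]
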